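-- pv_equiv track=rewrite | github.com/kevin11glitch/FUP | Conjuntos_e_dicionarios/13.py | verificar_cep
-- ===== SOURCE A (Python) =====
-- def verificar_cep(cep):
--     primeiro = ""
--     segundo = ""
--     terceiro = ""
--     estagio = 0
--
--     for i in cep:
--         if ord(i) == 46 or ord(i) == 45:
--             estagio += 1
--         else:
--             if ord(i) < 48 or ord(i) > 57:
--                 return "CEP errado"
--
--             if estagio == 0:
--                 primeiro += i
--             if estagio == 1:
--                 segundo += i
--             if estagio == 2:
--                 terceiro += i
--
--     if (len(primeiro) != 2) or (len(segundo) != 3) or (len(terceiro) != 3):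
--         return "CEP errado"
--
--     return True
-- ===== SOURCE B (Python) =====
-- def verificar_cep(cep):
--     if not all('0' <= c <= '9' or c in '.-' for c in cep):
--         return "CEP errado"
--     parts = cep.replace('.', '-').split('-')
--     return True if [len(p) for p in parts[:3]] == [2, 3, 3] else "CEP errado"
-- ===== Notes on version B (the rewrite author's own statement) =====
-- stated objective: simpler
-- what changed: A's single stateful loop (stage counter plus three string accumulators with early return) is replaced by a validate-then-split decomposition: reject any char outside digits/'.'/'-', then split on the separators and compare the lengths of the first three segments with [2,3,3].
import Mathlib
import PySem

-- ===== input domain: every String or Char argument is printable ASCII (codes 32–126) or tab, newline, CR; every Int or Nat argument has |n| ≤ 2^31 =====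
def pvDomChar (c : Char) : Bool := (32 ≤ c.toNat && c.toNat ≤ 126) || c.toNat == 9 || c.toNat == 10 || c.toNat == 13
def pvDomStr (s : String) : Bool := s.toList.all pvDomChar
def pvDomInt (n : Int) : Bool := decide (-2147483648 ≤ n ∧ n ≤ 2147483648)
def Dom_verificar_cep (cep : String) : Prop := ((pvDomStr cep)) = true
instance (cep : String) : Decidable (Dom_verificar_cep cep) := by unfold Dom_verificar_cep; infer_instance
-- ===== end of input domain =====

-- B replaces A's stateful stage-counting loop by a validate-then-split decomposition
-- (reject non-digit/non-separator chars, split on '.'/'-', compare the first three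
-- segment lengths with [2,3,3]); objective: simpler/more idiomatic, same cost.
-- Python A returns the bool True on success; both ports render it as the string "True".

-- ===== PORT A =====
-- the for-loop of A: state = (primeiro, segundo, terceiro, estagio), early return on a bad char
def vcLoopA (cs : List Char) (primeiro segundo terceiro : List Char) (estagio : Nat) : String :=
  match cs with
  | [] =>
    if primeiro.length ≠ 2 ∨ segundo.length ≠ 3 ∨ terceiro.length ≠ 3 then "CEP errado"
    else "True"
  | i :: rest =>
    if i.toNat = 46 ∨ i.toNat = 45 then
      vcLoopA rest primeiro segundo terceiro (estagio + 1)
    else if i.toNat < 48 ∨ i.toNat > 57 then "CEP errado"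
    else
      vcLoopA rest (if estagio = 0 then primeiro ++ [i] else primeiro)
                   (if estagio = 1 then segundo ++ [i] else segundo)
                   (if estagio = 2 then terceiro ++ [i] else terceiro) estagio

def verificar_cep (cep : String) : String :=
  vcLoopA cep.toList [] [] [] 0

-- ===== PORT B =====
-- hand port of cep.replace('.', '-').split('-'): exact for these single-character
-- separators (both are mapped to the same splitting character)
def splitSep : List Char → List (List Char)
  | [] => [[]]
  | c :: cs =>
    match splitSep cs with
    | [] => [[]]
    | g :: gs => if c = '.' ∨ c = '-' then [] :: g :: gs else (c :: g) :: gs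

def verificar_cep_alt (cep : String) : String :=
  if cep.toList.all (fun c => ('0' ≤ c && c ≤ '9') || c == '.' || c == '-') then
    if ((splitSep cep.toList).take 3).map List.length = [2, 3, 3] then "True"
    else "CEP errado"
  else "CEP errado"

-- ===== PRECONDITION & SPEC =====
def Spec_verificar_cep (cep : String) (out : String) : Prop := out = verificar_cep_alt cep
instance (cep : String) (out : String) : Decidable (Spec_verificar_cep cep out) := by unfold Spec_verificar_cep; infer_instance

-- ===== CLAIM (what is proved, stated in full; the proofs are below) =====
def Claim_equal_verificar_cep : Prop := ∀ (cep : String), Dom_verificar_cep cep → Spec_verificar_cep cep (verificar_cep cep)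

-- ===== LEMMAS AND PROOFS =====

-- character-class bridges between A's ord tests and B's char tests
theorem char_eq_dot (c : Char) : c = '.' ↔ c.toNat = 46 := by
  rw [Char.ext_iff, UInt32.ext_iff]; exact Iff.rfl

theorem char_eq_dash (c : Char) : c = '-' ↔ c.toNat = 45 := by
  rw [Char.ext_iff, UInt32.ext_iff]; exact Iff.rfl

theorem char_ge_zero (c : Char) : ('0' ≤ c) ↔ (48 ≤ c.toNat) := by
  rw [Char.le_def, UInt32.le_iff_toNat_le]; exact Iff.rfl

theorem char_le_nine (c : Char) : (c ≤ '9') ↔ (c.toNat ≤ 57) := by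
  rw [Char.le_def, UInt32.le_iff_toNat_le]; exact Iff.rfl

-- B's per-character validity test, named for the proofs
def vOK (c : Char) : Bool := ('0' ≤ c && c ≤ '9') || c == '.' || c == '-'

-- A's final length check
def chk (p s t : List Char) : String :=
  if p.length ≠ 2 ∨ s.length ≠ 3 ∨ t.length ≠ 3 then "CEP errado" else "True"

-- the segment of the split that A's accumulator number i receives when starting at stage e
def seg (r : List (List Char)) (e i : Nat) : List Char :=
  if e ≤ i then r.getD (i - e) [] else []

theorem splitSep_ne_nil (cs : List Char) : splitSep cs ≠ [] := by
  cases cs with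
  | nil => simp [splitSep]
  | cons c cs =>
    rcases hs : splitSep cs with _ | ⟨g, gs⟩
    · simp [splitSep, hs]
    · simp only [splitSep, hs]
      split <;> simp

theorem seg_cons_nil (r : List (List Char)) (e i : Nat) :
    seg ([] :: r) e i = seg r (e + 1) i := by
  unfold seg
  rcases Nat.lt_trichotomy i e with h | h | h
  · rw [if_neg (by omega), if_neg (by omega)]
  · subst h; simp
  · rw [if_pos (by omega), if_pos (by omega)]
    have : i - e = (i - (e + 1)) + 1 := by omega
    rw [this]; rfl

-- if any character is invalid, A returns "CEP errado" from whatever state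
theorem vcLoopA_invalid (cs : List Char) (h : cs.all vOK = false) :
    ∀ p s t e, vcLoopA cs p s t e = "CEP errado" := by
  induction cs with
  | nil => simp at h
  | cons c cs ih =>
    intro p s t e
    rw [List.all_cons, Bool.and_eq_false_iff] at h
    by_cases hv : vOK c = true
    · have hrest : cs.all vOK = false := by
        rcases h with h | h
        · rw [hv] at h; exact absurd h (by simp)
        · exact h
      have hv' := hv
      unfold vOK at hv'
      simp only [Bool.or_eq_true, Bool.and_eq_true, beq_iff_eq, decide_eq_true_eq] at hv'
      unfold vcLoopA
      by_cases hsep : c.toNat = 46 ∨ c.toNat = 45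
      · rw [if_pos hsep]; exact ih hrest _ _ _ _
      · rw [if_neg hsep]
        have hdig : 48 ≤ c.toNat ∧ c.toNat ≤ 57 := by
          rcases hv' with (⟨h1, h2⟩ | hd) | hd
          · exact ⟨(char_ge_zero c).mp h1, (char_le_nine c).mp h2⟩
          · exact absurd (Or.inl ((char_eq_dot c).mp hd)) hsep
          · exact absurd (Or.inr ((char_eq_dash c).mp hd)) hsep
        rw [if_neg (by omega)]
        exact ih hrest _ _ _ _
    · have hdot : c ≠ '.' := fun hh => hv (by simp [vOK, hh])
      have hdash : c ≠ '-' := fun hh => hv (by simp [vOK, hh])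
      have hd : ¬('0' ≤ c ∧ c ≤ '9') := fun ⟨h1, h2⟩ => hv (by simp [vOK, h1, h2])
      unfold vcLoopA
      rw [if_neg (by
        rw [← char_eq_dot, ← char_eq_dash]
        exact not_or.mpr ⟨hdot, hdash⟩)]
      rw [if_pos (by
        rw [char_ge_zero, char_le_nine] at hd
        omega)]

-- the loop invariant: on an all-valid suffix, A's result is the length check of the
-- accumulators extended with the segments of the split, shifted by the current stage
theorem vcLoopA_valid (cs : List Char) (h : cs.all vOK = true) :
    ∀ p s t e, vcLoopA cs p s t e =
      chk (p ++ seg (splitSep cs) e 0) (s ++ seg (splitSep cs) e 1)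
          (t ++ seg (splitSep cs) e 2) := by
  induction cs with
  | nil =>
    intro p s t e
    simp [vcLoopA, splitSep, seg, chk]
  | cons c cs ih =>
    intro p s t e
    rw [List.all_cons, Bool.and_eq_true] at h
    obtain ⟨hc, hrest⟩ := h
    unfold vOK at hc
    simp only [Bool.or_eq_true, Bool.and_eq_true, beq_iff_eq, decide_eq_true_eq] at hc
    obtain ⟨g, gs, hs⟩ : ∃ g gs, splitSep cs = g :: gs := by
      rcases hg : splitSep cs with _ | ⟨g, gs⟩
      · exact absurd hg (splitSep_ne_nil cs)
      · exact ⟨g, gs, rfl⟩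
    by_cases hsep : c = '.' ∨ c = '-'
    · have hsep' : c.toNat = 46 ∨ c.toNat = 45 := by
        rcases hsep with hh | hh
        · exact Or.inl ((char_eq_dot c).mp hh)
        · exact Or.inr ((char_eq_dash c).mp hh)
      have hsplit : splitSep (c :: cs) = [] :: splitSep cs := by
        simp [splitSep, hs, hsep]
      unfold vcLoopA
      rw [if_pos hsep', ih hrest, hsplit, seg_cons_nil, seg_cons_nil, seg_cons_nil]
    · have hdig : 48 ≤ c.toNat ∧ c.toNat ≤ 57 := by
        rcases hc with (⟨h1, h2⟩ | hd) | hd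
        · exact ⟨(char_ge_zero c).mp h1, (char_le_nine c).mp h2⟩
        · exact absurd (Or.inl hd) hsep
        · exact absurd (Or.inr hd) hsep
      have hsplit : splitSep (c :: cs) = (c :: g) :: gs := by
        simp [splitSep, hs, hsep]
      have h0 : (if e = 0 then p ++ [c] else p) ++ seg (g :: gs) e 0
          = p ++ seg ((c :: g) :: gs) e 0 := by
        rcases e with _ | _ | _ | e <;> simp [seg, List.getD]
      have h1 : (if e = 1 then s ++ [c] else s) ++ seg (g :: gs) e 1
          = s ++ seg ((c :: g) :: gs) e 1 := by
        rcases e with _ | _ | _ | e <;> simp [seg, List.getD]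
      have h2 : (if e = 2 then t ++ [c] else t) ++ seg (g :: gs) e 2
          = t ++ seg ((c :: g) :: gs) e 2 := by
        rcases e with _ | _ | _ | e <;> simp [seg, List.getD]
      unfold vcLoopA
      rw [if_neg (by rw [← char_eq_dot, ← char_eq_dash]; exact hsep),
          if_neg (by omega), ih hrest, hs, hsplit, h0, h1, h2]

-- on an all-valid string, A's length check over the three leading segments agrees
-- with B's take-3 comparison
theorem chk_eq_take3 (r : List (List Char)) :
    chk (seg r 0 0) (seg r 0 1) (seg r 0 2) =
      if (r.take 3).map List.length = [2, 3, 3] then "True" else "CEP errado" := by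
  match r with
  | [] => simp [chk, seg]
  | [a] => simp [chk, seg, List.getD]
  | [a, b] => simp [chk, seg, List.getD]
  | a :: b :: c :: rest =>
    simp only [seg, List.getD, chk, List.take, List.map]
    simp only [Nat.zero_le, if_pos, Nat.sub_zero, List.getElem?_cons_zero,
      List.getElem?_cons_succ, Option.getD_some]
    by_cases h : a.length = 2 ∧ b.length = 3 ∧ c.length = 3
    · rw [if_neg (by omega), if_pos (by simp [h.1, h.2.1, h.2.2])]
    · rw [if_pos (by omega), if_neg (by simp; omega)]

-- ===== VERDICT (by name: the statement is the Claim_ definition above) =====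
theorem verificar_cep_spec : Claim_equal_verificar_cep := by
  intro cep _
  unfold Spec_verificar_cep verificar_cep verificar_cep_alt
  have hall : cep.toList.all (fun c => ('0' ≤ c && c ≤ '9') || c == '.' || c == '-')
      = cep.toList.all vOK := by
    unfold vOK; rfl
  by_cases h : cep.toList.all vOK = true
  · rw [hall, if_pos h, vcLoopA_valid cep.toList h [] [] [] 0]
    simpa using chk_eq_take3 (splitSep cep.toList)
  · rw [hall, if_neg h,
      vcLoopA_invalid cep.toList (Bool.eq_false_iff.mpr h) [] [] [] 0]
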